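-- pv_equiv track=rewrite | github.com/DatEOT/autoQA_AI | qa_ai/app/routers/question.py | generate_bloom_assignment
-- ===== SOURCE A (Python) =====
-- from typing import List, Tuple, Dict
--
-- def get_bloom_level_name(level: int) -> str:
--     """Lấy tên cấp độ Bloom tương ứng."""
--     level_names = {
--         1: "Nhớ",
--         2: "Hiểu",
--         3: "Áp dụng",
--         4: "Phân tích",
--         5: "Đánh giá",
--         6: "Sáng tạo",
--     }
--     return level_names.get(level, "Không xác định")
--
-- def generate_bloom_assignment(
--     segments: List[Tuple[str, str]],
-- ) -> Tuple[List[str], List[int]]: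
--     """Tạo phân bổ cấp độ Bloom cho các đoạn văn."""
--     total_segments = len(segments)
--     base_segments_per_level = total_segments // 6
--     remainder = total_segments % 6
--
--     segments_per_level = [base_segments_per_level] * 6
--     for i in range(remainder):
--         segments_per_level[i] += 1
--
--     bloom_assignment = []
--     segment_idx = 0
--     for level in range(1, 7):
--         num_segments = segments_per_level[level - 1]
--         level_name = get_bloom_level_name(level)
--         for _ in range(num_segments):
--             bloom_assignment.append(
--                 f"- Đoạn văn {segment_idx + 1}: Cấp độ {level} - {level_name}"
--             )
--             segment_idx += 1
--
--     return bloom_assignment, segments_per_level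
-- ===== SOURCE B (Python) =====
-- def get_bloom_level_name(level: int) -> str:
--     level_names = {
--         1: "Nhớ",
--         2: "Hiểu",
--         3: "Áp dụng",
--         4: "Phân tích",
--         5: "Đánh giá",
--         6: "Sáng tạo",
--     }
--     return level_names.get(level, "Không xác định")
--
--
-- def generate_bloom_assignment(segments):
--     total = len(segments)
--     base, remainder = divmod(total, 6)
--     segments_per_level = [base + (1 if i < remainder else 0) for i in range(6)]
--     cutoff = remainder * (base + 1)
--
--     def level_of(idx):
--         # levels 1..remainder hold base+1 segments, the rest hold base
--         if idx < cutoff: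
--             return idx // (base + 1) + 1
--         return remainder + (idx - cutoff) // base + 1
--
--     bloom_assignment = [
--         f"- Đoạn văn {idx + 1}: Cấp độ {level_of(idx)} - {get_bloom_level_name(level_of(idx))}"
--         for idx in range(total)
--     ]
--     return bloom_assignment, segments_per_level
-- ===== Notes on version B (the rewrite author's own statement) =====
-- stated objective: alternative
-- what changed: Replaces the nested (level, inner-segment) loops with one flat pass over all segment indices, computing each index's Bloom level by a closed-form floor-division formula instead of a running segment counter.
import Mathlib
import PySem

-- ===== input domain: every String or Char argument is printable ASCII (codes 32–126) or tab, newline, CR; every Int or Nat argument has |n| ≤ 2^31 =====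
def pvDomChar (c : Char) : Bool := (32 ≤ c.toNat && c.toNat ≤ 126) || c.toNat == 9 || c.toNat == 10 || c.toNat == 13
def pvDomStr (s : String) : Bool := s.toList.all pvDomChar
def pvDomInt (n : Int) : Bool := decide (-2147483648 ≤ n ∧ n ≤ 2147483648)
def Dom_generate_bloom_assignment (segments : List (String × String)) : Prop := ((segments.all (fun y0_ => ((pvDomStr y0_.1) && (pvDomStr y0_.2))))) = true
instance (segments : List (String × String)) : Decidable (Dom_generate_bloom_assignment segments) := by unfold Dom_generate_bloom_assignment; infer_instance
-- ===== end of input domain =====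

-- B replaces A's nested level/segment loops by one flat pass over segment indices with a closed-form index→level formula; same output, proved equal (alternative decomposition).
-- ===== PORT A =====
-- helper: get_bloom_level_name (dict literal .get with default)
def get_bloom_level_name (level : Int) : String :=
  let level_names : PySem.Dict Int String := PySem.Dict.ofList
    [(1, "Nhớ"), (2, "Hiểu"), (3, "Áp dụng"), (4, "Phân tích"), (5, "Đánh giá"), (6, "Sáng tạo")]
  PySem.Dict.getD level_names level "Không xác định"

def generate_bloom_assignment (segments : List (String × String)) : List String × List Int :=
  let total_segments : Int := segments.length
  let base_segments_per_level : Int := PySem.Int.floordiv total_segments 6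
  let remainder : Int := PySem.Int.mod total_segments 6
  let segments_per_level : List Int := List.replicate 6 base_segments_per_level
  -- for i in range(remainder): segments_per_level[i] += 1   (indices in range: pyGetD/pySetD exact here)
  let segments_per_level : List Int :=
    (PySem.List.pyRange 0 remainder 1).foldl
      (fun spl i => PySem.List.pySetD spl i (PySem.List.pyGetD spl i 0 + 1)) segments_per_level
  -- outer loop over levels 1..6 with state (bloom_assignment, segment_idx)
  let st : List String × Int :=
    (PySem.List.pyRange 1 7 1).foldl
      (fun (st : List String × Int) level =>
        let num_segments : Int := PySem.List.pyGetD segments_per_level (level - 1) 0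
        let level_name : String := get_bloom_level_name level
        (PySem.List.pyRange 0 num_segments 1).foldl
          (fun (st2 : List String × Int) _ =>
            (st2.1 ++ ["- Đoạn văn " ++ PySem.Int.toStr (st2.2 + 1) ++ ": Cấp độ "
                ++ PySem.Int.toStr level ++ " - " ++ level_name],
             st2.2 + 1)) st)
      ([], 0)
  (st.1, segments_per_level)

-- ===== PORT B =====
def generate_bloom_assignment_alt (segments : List (String × String)) : List String × List Int :=
  let total : Int := segments.length
  let bd : Int × Int := (PySem.Int.divmod? total 6).getD (0, 0)  -- divisor 6 ≠ 0: never none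
  let base : Int := bd.1
  let remainder : Int := bd.2
  let segments_per_level : List Int :=
    (PySem.List.pyRange 0 6 1).map (fun i => base + if i < remainder then 1 else 0)
  let cutoff : Int := remainder * (base + 1)
  let level_of : Int → Int := fun idx =>
    if idx < cutoff then PySem.Int.floordiv idx (base + 1) + 1
    else remainder + PySem.Int.floordiv (idx - cutoff) base + 1
  let bloom_assignment : List String :=
    (PySem.List.pyRange 0 total 1).map (fun idx =>
      "- Đoạn văn " ++ PySem.Int.toStr (idx + 1) ++ ": Cấp độ "
        ++ PySem.Int.toStr (level_of idx) ++ " - " ++ get_bloom_level_name (level_of idx))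
  (bloom_assignment, segments_per_level)

-- ===== PRECONDITION & SPEC =====
def Spec_generate_bloom_assignment (segments : List (String × String)) (out : List String × List Int) : Prop := out = generate_bloom_assignment_alt segments
instance (segments : List (String × String)) (out : List String × List Int) : Decidable (Spec_generate_bloom_assignment segments out) := by unfold Spec_generate_bloom_assignment; infer_instance

-- ===== CLAIM (what is proved, stated in full; the proofs are below) =====
def Claim_equal_generate_bloom_assignment : Prop := ∀ (segments : List (String × String)), Dom_generate_bloom_assignment segments → Spec_generate_bloom_assignment segments (generate_bloom_assignment segments)

-- ===== LEMMAS AND PROOFS =====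

theorem perEq (b : Int) (r : Nat) (hr : r < 6) :
    (PySem.List.pyRange 0 (r:Int) 1).foldl
      (fun spl i => PySem.List.pySetD spl i (PySem.List.pyGetD spl i 0 + 1)) (List.replicate 6 b)
    = (PySem.List.pyRange 0 6 1).map (fun i => b + if i < (r:Int) then 1 else 0) := by
  have h6 : PySem.List.pyRange 0 6 1 = [0,1,2,3,4,5] := by decide
  have h0 : PySem.List.pyRange 0 0 1 = [] := by decide
  have h1 : PySem.List.pyRange 0 1 1 = [0] := by decide
  have h2 : PySem.List.pyRange 0 2 1 = [0,1] := by decide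
  have h3 : PySem.List.pyRange 0 3 1 = [0,1,2] := by decide
  have h4 : PySem.List.pyRange 0 4 1 = [0,1,2,3] := by decide
  have h5 : PySem.List.pyRange 0 5 1 = [0,1,2,3,4] := by decide
  interval_cases r <;>
    norm_num [h0, h1, h2, h3, h4, h5, h6, List.replicate, List.foldl,
      PySem.List.pySetD_of_nonneg, PySem.List.pyGetD_of_nonneg, List.set,
      show Int.toNat 2 = 2 from rfl, show Int.toNat 3 = 3 from rfl, show Int.toNat 4 = 4 from rfl]

-- inner loop of A: append c formatted strings while advancing segment_idx
theorem innerA (c : Int) (hc : 0 ≤ c) (level : Int) (acc : List String) (idx : Int) :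
    (PySem.List.pyRange 0 c 1).foldl
      (fun (st2 : List String × Int) _ =>
        (st2.1 ++ ["- Đoạn văn " ++ PySem.Int.toStr (st2.2 + 1) ++ ": Cấp độ "
            ++ PySem.Int.toStr level ++ " - " ++ get_bloom_level_name level],
         st2.2 + 1)) (acc, idx)
    = (acc ++ (PySem.List.pyRange 0 c 1).map
        (fun j => "- Đoạn văn " ++ PySem.Int.toStr (idx + j + 1) ++ ": Cấp độ "
            ++ PySem.Int.toStr level ++ " - " ++ get_bloom_level_name level),
       idx + c) := by
  obtain ⟨m, rfl⟩ := Int.eq_ofNat_of_zero_le hc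
  induction m generalizing acc idx with
  | zero => simp [PySem.List.pyRange_one_eq_nil]
  | succ k ih =>
    rw [show ((k+1 : Nat) : Int) = (k : Int) + 1 by push_cast; ring]
    rw [PySem.List.pyRange_one_succ_right (by positivity), List.foldl_append,
      List.map_append, ih acc idx (by positivity)]
    simp [List.foldl]
    omega

theorem pyRange_shift (a b : Int) :
    PySem.List.pyRange a b 1 = (PySem.List.pyRange 0 (b - a) 1).map (fun j => a + j) := by
  rw [PySem.List.pyRange_one, PySem.List.pyRange_one]
  simp [List.map_map]

theorem level_of_eq (b r cutoff l j idx : Int) (hb : 0 ≤ b) (_hr0 : 0 ≤ r)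
    (hcut : cutoff = r * (b + 1)) (hidx : idx = b * l + min l r + j) (_hl : 0 ≤ l) (hj : 0 ≤ j)
    (hbound : (l < r ∧ j ≤ b) ∨ (r ≤ l ∧ j < b)) :
    (if idx < cutoff then PySem.Int.floordiv idx (b + 1) + 1
     else r + PySem.Int.floordiv (idx - cutoff) b + 1) = l + 1 := by
  rcases hbound with ⟨hlr, hjb⟩ | ⟨hrl, hjb⟩
  · rw [if_pos (by rw [hidx, hcut, min_eq_left hlr.le]; nlinarith)]
    have : PySem.Int.floordiv idx (b + 1) = l := by
      rw [PySem.Int.floordiv_eq_iff_of_pos (by omega)]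
      rw [hidx, min_eq_left hlr.le]
      constructor <;> nlinarith
    omega
  · have hbpos : 0 < b := by omega
    rw [if_neg (by rw [hidx, hcut, min_eq_right hrl]; nlinarith)]
    have : PySem.Int.floordiv (idx - cutoff) b = l - r := by
      rw [PySem.Int.floordiv_eq_iff_of_pos hbpos]
      rw [hidx, hcut, min_eq_right hrl]
      constructor <;> nlinarith
    omega

theorem blockEq (b r S k l : Int) (hb : 0 ≤ b) (hr0 : 0 ≤ r) (hk : 0 ≤ k) (hlk : l = k + 1)
    (hS : S = b * k + min k r) :
    (PySem.List.pyRange S (S + (b + if k < r then 1 else 0)) 1).map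
      (fun idx => "- Đoạn văn " ++ PySem.Int.toStr (idx + 1) ++ ": Cấp độ "
        ++ PySem.Int.toStr (if idx < r * (b + 1) then PySem.Int.floordiv idx (b + 1) + 1
            else r + PySem.Int.floordiv (idx - r * (b + 1)) b + 1)
        ++ " - " ++ get_bloom_level_name (if idx < r * (b + 1) then PySem.Int.floordiv idx (b + 1) + 1
            else r + PySem.Int.floordiv (idx - r * (b + 1)) b + 1))
    = (PySem.List.pyRange 0 (b + if k < r then 1 else 0) 1).map
      (fun j => "- Đoạn văn " ++ PySem.Int.toStr (S + j + 1) ++ ": Cấp độ "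
        ++ PySem.Int.toStr l ++ " - " ++ get_bloom_level_name l) := by
  rw [pyRange_shift S (S + (b + if k < r then 1 else 0))]
  simp only [add_sub_cancel_left, List.map_map]
  refine List.map_congr_left ?_
  intro j hj
  rw [PySem.List.mem_pyRange_one] at hj
  have hlv : (if S + j < r * (b + 1) then PySem.Int.floordiv (S + j) (b + 1) + 1
      else r + PySem.Int.floordiv (S + j - r * (b + 1)) b + 1) = k + 1 := by
    refine level_of_eq b r (r * (b + 1)) k j (S + j) hb hr0 rfl (by rw [hS]) hk hj.1 ?_
    rcases hj with ⟨h1, h2⟩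
    by_cases h : k < r
    · rw [if_pos h] at h2; exact Or.inl ⟨h, by omega⟩
    · rw [if_neg h] at h2; exact Or.inr ⟨by omega, by omega⟩
  simp only [Function.comp_apply]
  rw [hlv, hlk]

set_option maxHeartbeats 2000000 in
theorem main (segs : List (String × String)) :
    generate_bloom_assignment segs = generate_bloom_assignment_alt segs := by
  unfold generate_bloom_assignment generate_bloom_assignment_alt
  have hdm : PySem.Int.divmod? (segs.length : Int) 6
      = some (PySem.Int.floordiv (segs.length : Int) 6, PySem.Int.mod (segs.length : Int) 6) := by
    simp [PySem.Int.divmod?, PySem.Int.floordiv, PySem.Int.mod]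
  dsimp only
  rw [hdm]
  have hfd : PySem.Int.floordiv (segs.length : Int) 6 = ((segs.length / 6 : Nat) : Int) := by
    exact_mod_cast PySem.Int.floordiv_natCast segs.length 6
  have hmd : PySem.Int.mod (segs.length : Int) 6 = ((segs.length % 6 : Nat) : Int) := by
    exact_mod_cast PySem.Int.mod_natCast segs.length 6
  rw [hfd, hmd]
  dsimp only [Option.getD]
  rw [perEq ((segs.length / 6 : Nat) : Int) (segs.length % 6) (Nat.mod_lt _ (by norm_num))]
  congr 1
  set b : Int := ((segs.length / 6 : Nat) : Int) with hbdef
  set r : Int := ((segs.length % 6 : Nat) : Int) with hrdef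
  have hb : 0 ≤ b := by omega
  have hr0 : 0 ≤ r := by omega
  have hr6 : r < 6 := by omega
  have hN : (segs.length : Int) = 6 * b + r := by omega
  rw [show PySem.List.pyRange 1 7 1 = [(1:Int),2,3,4,5,6] from by decide]
  simp only [List.foldl_cons, List.foldl_nil]
  simp only [show (1:Int) - 1 = 0 from by norm_num, show (2:Int) - 1 = 1 from by norm_num, show (3:Int) - 1 = 2 from by norm_num, show (4:Int) - 1 = 3 from by norm_num, show (5:Int) - 1 = 4 from by norm_num, show (6:Int) - 1 = 5 from by norm_num]
  have hg : ∀ k : Int, 0 ≤ k → k < 6 →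
      PySem.List.pyGetD ((PySem.List.pyRange 0 6 1).map (fun i => b + if i < r then 1 else 0)) k 0
        = b + if k < r then 1 else 0 := by
    intro k h1 h2
    rw [PySem.List.pyGetD_map_pyRange_of_nonneg _ 6 k 0 h1 h2]
  rw [hg 0 (by norm_num) (by norm_num), hg 1 (by norm_num) (by norm_num), hg 2 (by norm_num) (by norm_num), hg 3 (by norm_num) (by norm_num), hg 4 (by norm_num) (by norm_num), hg 5 (by norm_num) (by norm_num)]
  have hc : ∀ k : Int, 0 ≤ b + if k < r then 1 else 0 := by intro k; split_ifs <;> omega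
  rw [innerA _ (hc 0) 1]
  rw [innerA _ (hc 1) 2]
  rw [innerA _ (hc 2) 3]
  rw [innerA _ (hc 3) 4]
  rw [innerA _ (hc 4) 5]
  rw [innerA _ (hc 5) 6]
  dsimp only
  rw [show (segs.length : Int) = (0 + (b + if (0:Int) < r then 1 else 0) + (b + if (1:Int) < r then 1 else 0) + (b + if (2:Int) < r then 1 else 0) + (b + if (3:Int) < r then 1 else 0) + (b + if (4:Int) < r then 1 else 0) + (b + if (5:Int) < r then 1 else 0)) from by split_ifs <;> omega]
  rw [PySem.List.pyRange_one_append 0 (0 + (b + if (0:Int) < r then 1 else 0)) (0 + (b + if (0:Int) < r then 1 else 0) + (b + if (1:Int) < r then 1 else 0) + (b + if (2:Int) < r then 1 else 0) + (b + if (3:Int) < r then 1 else 0) + (b + if (4:Int) < r then 1 else 0) + (b + if (5:Int) < r then 1 else 0)) (by split_ifs <;> omega) (by split_ifs <;> omega)]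
  rw [PySem.List.pyRange_one_append (0 + (b + if (0:Int) < r then 1 else 0)) (0 + (b + if (0:Int) < r then 1 else 0) + (b + if (1:Int) < r then 1 else 0)) (0 + (b + if (0:Int) < r then 1 else 0) + (b + if (1:Int) < r then 1 else 0) + (b + if (2:Int) < r then 1 else 0) + (b + if (3:Int) < r then 1 else 0) + (b + if (4:Int) < r then 1 else 0) + (b + if (5:Int) < r then 1 else 0)) (by split_ifs <;> omega) (by split_ifs <;> omega)]
  rw [PySem.List.pyRange_one_append (0 + (b + if (0:Int) < r then 1 else 0) + (b + if (1:Int) < r then 1 else 0)) (0 + (b + if (0:Int) < r then 1 else 0) + (b + if (1:Int) < r then 1 else 0) + (b + if (2:Int) < r then 1 else 0)) (0 + (b + if (0:Int) < r then 1 else 0) + (b + if (1:Int) < r then 1 else 0) + (b + if (2:Int) < r then 1 else 0) + (b + if (3:Int) < r then 1 else 0) + (b + if (4:Int) < r then 1 else 0) + (b + if (5:Int) < r then 1 else 0)) (by split_ifs <;> omega) (by split_ifs <;> omega)]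
  rw [PySem.List.pyRange_one_append (0 + (b + if (0:Int) < r then 1 else 0) + (b + if (1:Int) < r then 1 else 0) + (b + if (2:Int) < r then 1 else 0)) (0 + (b + if (0:Int) < r then 1 else 0) + (b + if (1:Int) < r then 1 else 0) + (b + if (2:Int) < r then 1 else 0) + (b + if (3:Int) < r then 1 else 0)) (0 + (b + if (0:Int) < r then 1 else 0) + (b + if (1:Int) < r then 1 else 0) + (b + if (2:Int) < r then 1 else 0) + (b + if (3:Int) < r then 1 else 0) + (b + if (4:Int) < r then 1 else 0) + (b + if (5:Int) < r then 1 else 0)) (by split_ifs <;> omega) (by split_ifs <;> omega)]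
  rw [PySem.List.pyRange_one_append (0 + (b + if (0:Int) < r then 1 else 0) + (b + if (1:Int) < r then 1 else 0) + (b + if (2:Int) < r then 1 else 0) + (b + if (3:Int) < r then 1 else 0)) (0 + (b + if (0:Int) < r then 1 else 0) + (b + if (1:Int) < r then 1 else 0) + (b + if (2:Int) < r then 1 else 0) + (b + if (3:Int) < r then 1 else 0) + (b + if (4:Int) < r then 1 else 0)) (0 + (b + if (0:Int) < r then 1 else 0) + (b + if (1:Int) < r then 1 else 0) + (b + if (2:Int) < r then 1 else 0) + (b + if (3:Int) < r then 1 else 0) + (b + if (4:Int) < r then 1 else 0) + (b + if (5:Int) < r then 1 else 0)) (by split_ifs <;> omega) (by split_ifs <;> omega)]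
  simp only [List.map_append, List.nil_append, List.append_assoc]
  congr 1
  · exact (blockEq b r 0 0 1 hb hr0 (by norm_num) (by norm_num) (by omega)).symm
  congr 1
  · exact (blockEq b r (0 + (b + if (0:Int) < r then 1 else 0)) 1 2 hb hr0 (by norm_num) (by norm_num) (by omega)).symm
  congr 1
  · exact (blockEq b r (0 + (b + if (0:Int) < r then 1 else 0) + (b + if (1:Int) < r then 1 else 0)) 2 3 hb hr0 (by norm_num) (by norm_num) (by omega)).symm
  congr 1
  · exact (blockEq b r (0 + (b + if (0:Int) < r then 1 else 0) + (b + if (1:Int) < r then 1 else 0) + (b + if (2:Int) < r then 1 else 0)) 3 4 hb hr0 (by norm_num) (by norm_num) (by omega)).symm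
  congr 1
  · exact (blockEq b r (0 + (b + if (0:Int) < r then 1 else 0) + (b + if (1:Int) < r then 1 else 0) + (b + if (2:Int) < r then 1 else 0) + (b + if (3:Int) < r then 1 else 0)) 4 5 hb hr0 (by norm_num) (by norm_num) (by omega)).symm
  exact (blockEq b r (0 + (b + if (0:Int) < r then 1 else 0) + (b + if (1:Int) < r then 1 else 0) + (b + if (2:Int) < r then 1 else 0) + (b + if (3:Int) < r then 1 else 0) + (b + if (4:Int) < r then 1 else 0)) 5 6 hb hr0 (by norm_num) (by norm_num) (by omega)).symm

-- ===== VERDICT (by name: the statement is the Claim_ definition above) =====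
theorem generate_bloom_assignment_spec : Claim_equal_generate_bloom_assignment := by
  intro segs _
  exact main segs
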